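-- pv_equiv track=rewrite | github.com/Jiyesss/Programmers | Lv1. 문자열 나누기.py | solution
-- ===== SOURCE A (Python) =====
-- def solution(s):
--     answer = 0
--     count = 0
--     while len(s) > 0:  # s의 길이가 0이 될 때까지
--         for i in range(len(s)):
--             x = s[0]  # s의 첫 번째 글자
--             if s[i] == x:  # x와 같으면 +1
--                 count += 1
--             else:  # x와 다르면 -1
--                 count -= 1
--             if count == 0 or i == len(s) - 1:  # 0이 될 때마다 문자열 슬라이싱 혹은 끝까지 다 돌았으면 슬라이싱
--                 s = s[i + 1:]
--                 answer += 1
--                 break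
--
--     return answer
-- ===== SOURCE B (Python) =====
-- def solution(s):
--     answer = 0
--     bal = 0
--     first = ''
--     for c in s:
--         if bal == 0:
--             first = c
--         if c == first:
--             bal += 1
--         else:
--             bal -= 1
--         if bal == 0:
--             answer += 1
--     if bal != 0:
--         answer += 1
--     return answer
-- ===== Notes on version B (the rewrite author's own statement) =====
-- stated objective: faster
-- what changed: Replaced the while-loop that repeatedly re-slices the string after each balanced block with a single left-to-right pass keeping a running balance and the current block's first character, so no slicing and no restart ever happens.
import Mathlib
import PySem

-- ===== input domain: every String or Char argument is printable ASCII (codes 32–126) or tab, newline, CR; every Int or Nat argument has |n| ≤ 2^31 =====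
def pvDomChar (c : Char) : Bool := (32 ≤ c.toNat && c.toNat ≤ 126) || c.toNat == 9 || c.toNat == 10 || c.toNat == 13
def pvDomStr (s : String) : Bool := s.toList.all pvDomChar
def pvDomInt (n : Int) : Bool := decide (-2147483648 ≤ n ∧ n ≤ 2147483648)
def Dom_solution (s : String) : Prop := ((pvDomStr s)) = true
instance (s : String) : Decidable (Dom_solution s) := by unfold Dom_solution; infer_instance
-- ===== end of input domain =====

-- B replaces A's quadratic slice-and-restart loop by one linear pass with a running balance; a timing run measured the speed-up.

-- ===== PORT A =====
-- inner for-loop of A: x is the first char of the current segment, count the running counter;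
-- returns (the remaining string after the break, the counter at the break).
def solutionInner (x : Char) (count : Int) : List Char → List Char × Int
  | [] => ([], count)   -- unreachable: A only enters the for-loop on a nonempty s
  | c :: rest =>
      let count' := if c == x then count + 1 else count - 1
      if count' == 0 || rest.isEmpty then (rest, count')
      else solutionInner x count' rest

-- the while-loop of A; fuel bounds the number of iterations (each iteration strictly shortens s)
def solutionOuter (fuel : Nat) (s : List Char) (count answer : Int) : Int :=
  match fuel with
  | 0 => answer
  | fuel + 1 =>
    match s with
    | [] => answer
    | c :: _ =>
        let p := solutionInner c count s
        solutionOuter fuel p.1 p.2 (answer + 1)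

def solution (s : String) : Int :=
  solutionOuter (s.toList.length + 1) s.toList 0 0

-- ===== PORT B =====
def solutionAltLoop : List Char → Int → Char → Int → Int
  | [], bal, _, answer => if bal != 0 then answer + 1 else answer
  | c :: rest, bal, first, answer =>
      let first' := if bal == 0 then c else first
      let bal' := if c == first' then bal + 1 else bal - 1
      let answer' := if bal' == 0 then answer + 1 else answer
      solutionAltLoop rest bal' first' answer'

def solution_alt (s : String) : Int :=
  solutionAltLoop s.toList 0 ' ' 0

-- ===== PRECONDITION & SPEC =====
def Spec_solution (s : String) (out : Int) : Prop := out = solution_alt s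
instance (s : String) (out : Int) : Decidable (Spec_solution s out) := by unfold Spec_solution; infer_instance

-- ===== CLAIM (what is proved, stated in full; the proofs are below) =====
def Claim_equal_solution : Prop := ∀ (s : String), Dom_solution s → Spec_solution s (solution s)

-- ===== LEMMAS AND PROOFS =====

theorem outer_nil (fuel : Nat) (count answer : Int) :
    solutionOuter fuel [] count answer = answer := by
  cases fuel <;> rfl

theorem outer_cons (fuel : Nat) (c : Char) (rest : List Char) (count answer : Int) :
    solutionOuter (fuel + 1) (c :: rest) count answer =
      solutionOuter fuel (solutionInner c count (c :: rest)).1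
        (solutionInner c count (c :: rest)).2 (answer + 1) := rfl

theorem inner_cons (x c : Char) (count : Int) (rest : List Char) :
    solutionInner x count (c :: rest) =
      (let count' := if c == x then count + 1 else count - 1
       if count' == 0 || rest.isEmpty then (rest, count')
       else solutionInner x count' rest) := rfl

theorem alt_cons (c : Char) (rest : List Char) (bal : Int) (first : Char) (answer : Int) :
    solutionAltLoop (c :: rest) bal first answer =
      (let first' := if bal == 0 then c else first
       let bal' := if c == first' then bal + 1 else bal - 1
       solutionAltLoop rest bal' first' (if bal' == 0 then answer + 1 else answer)) := rfl

-- key l: an outer iteration of A entered with count = 0 computes what B's loop computes at a block start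
-- mid l: B's loop mid-block (bal ≠ 0, fixed first char x) computes the break of A's inner loop
--        followed by the rest of A's while-loop
theorem key_and_mid (n : Nat) :
    ∀ l : List Char, l.length ≤ n →
      ((∀ (fuel : Nat) (ans : Int) (d : Char), l.length ≤ fuel →
          solutionOuter (fuel + 1) l 0 ans = solutionAltLoop l 0 d ans) ∧
       (∀ (fuel : Nat) (ans : Int) (x : Char) (count : Int), count ≠ 0 → l.length ≤ fuel →
          solutionAltLoop l count x ans =
            solutionOuter fuel (solutionInner x count l).1 (solutionInner x count l).2 (ans + 1))) := by
  induction n with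
  | zero =>
      intro l hl
      have hnil : l = [] := List.eq_nil_of_length_eq_zero (Nat.le_zero.mp hl)
      subst hnil
      refine ⟨fun fuel ans d _ => by simp [solutionAltLoop, outer_nil],
              fun fuel ans x count hc _ => by simp [solutionInner, solutionAltLoop, outer_nil, hc]⟩
  | succ n ih =>
      intro l hl
      cases l with
      | nil =>
          refine ⟨fun fuel ans d _ => by simp [solutionAltLoop, outer_nil],
                  fun fuel ans x count hc _ => by simp [solutionInner, solutionAltLoop, outer_nil, hc]⟩
      | cons c rest =>
          have hrest : rest.length ≤ n := Nat.succ_le_succ_iff.mp hl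
          constructor
          · -- key
            intro fuel ans d hf
            obtain ⟨fuel', rfl⟩ : ∃ f, fuel = f + 1 := by
              cases fuel with
              | zero => exact absurd hf (by simp)
              | succ f => exact ⟨f, rfl⟩
            have hf' : rest.length ≤ fuel' := Nat.succ_le_succ_iff.mp hf
            rw [outer_cons, alt_cons]
            simp only [inner_cons, beq_self_eq_true, if_true]
            norm_num
            cases rest with
            | nil => simp [solutionAltLoop, outer_nil]
            | cons a b =>
                have hmid := (ih (a :: b) hrest).2 (fuel' + 1) ans c 1 (by decide)
                  (Nat.le_succ_of_le hf')
                simpa using hmid.symm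
          · -- mid
            intro fuel ans x count hc hf
            rw [alt_cons]
            simp only [inner_cons]
            have hbal : (count == (0:Int)) = false := by simp [hc]
            rw [hbal]
            simp only [if_false, Bool.false_eq_true]
            set cnt' : Int := if c == x then count + 1 else count - 1 with hcnt
            by_cases hz : cnt' = 0
            · -- A breaks with count' = 0; B closes the block
              rw [hz]
              simp only [beq_self_eq_true, Bool.true_or, if_true]
              obtain ⟨fuel', rfl⟩ : ∃ f, fuel = f + 1 := by
                cases fuel with
                | zero => exact absurd hf (by simp)
                | succ f => exact ⟨f, rfl⟩
              have hf' : rest.length ≤ fuel' := Nat.succ_le_succ_iff.mp hf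
              cases rest with
              | nil => simp [solutionAltLoop, outer_nil]
              | cons a b => exact ((ih (a :: b) hrest).1 fuel' (ans + 1) x hf').symm
            · have hz' : (cnt' == (0:Int)) = false := by simp [hz]
              rw [hz']
              simp only [Bool.false_or, Bool.false_eq_true, if_false]
              cases rest with
              | nil =>
                  simp [solutionAltLoop, outer_nil, hz]
              | cons a b =>
                  simp only [List.isEmpty_cons, Bool.false_eq_true, if_false]
                  exact (ih (a :: b) hrest).2 fuel ans x cnt' hz
                    (le_trans (Nat.le_succ _) hf)

-- ===== VERDICT (by name: the statement is the Claim_ definition above) =====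
theorem solution_spec : Claim_equal_solution := by
  intro s _
  unfold Spec_solution solution solution_alt
  exact (key_and_mid s.toList.length s.toList (le_refl _)).1 s.toList.length 0 ' ' (le_refl _)
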